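-- pv_equiv track=rewrite | github.com/cogent3/cogent3 | src/cogent3/evolve/likelihood_function.py | _get_param_mapping
-- ===== SOURCE A (Python) =====
-- from collections import defaultdict
--
-- def _get_param_mapping(rich, simple):
--     """returns {simple_param_name: rich_param_name, ...}, the mapping of simple
--     to rich parameters based on matrix coordinates
--     """
--     assert len(rich) >= len(simple)
--     simple_to_rich = defaultdict(set)
--     rich_to_simple = defaultdict(set)
--     for simple_param in simple:
--         simple_coords = simple[simple_param]
--         for rich_param in rich:
--             rich_coords = rich[rich_param]
--             if rich_coords <= simple_coords:
--                 simple_to_rich[simple_param].add(rich_param)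
--                 rich_to_simple[rich_param].add(simple_param)
--
--     for rich_param, simple_counterparts in rich_to_simple.items():
--         if len(simple_counterparts) == 1:
--             continue
--
--         sized_simple = [(len(simple[param]), param) for param in simple_counterparts]
--         sized_simple.sort()
--         if sized_simple[0][0] == sized_simple[1][0]:
--             msg = f"{sized_simple[0][1]} and {sized_simple[1][1]} tied for matrix space"
--             raise ValueError(msg)
--
--         _, chosen = sized_simple.pop(0)
--         rich_to_simple[rich_param] = [chosen]
--         for _, simple_param in sized_simple:
--             simple_to_rich[simple_param].remove(rich_param)
--
--     return simple_to_rich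
-- ===== SOURCE B (Python) =====
-- from collections import defaultdict
--
--
-- def _get_param_mapping(rich, simple):
--     """returns {simple_param_name: rich_param_name, ...}, the mapping of simple
--     to rich parameters based on matrix coordinates
--     """
--     assert len(rich) >= len(simple)
--     simple_items = list(simple.items())
--     # pick each rich param's owner directly: the matching simple param with the
--     # smallest coord set (ties broken by name; a size tie is an error)
--     winners = []
--     for rich_param, rich_coords in rich.items():
--         cands = sorted((len(coords), name) for name, coords in simple_items
--                        if rich_coords <= coords)
--         if not cands:
--             continue
--         if len(cands) > 1 and cands[0][0] == cands[1][0]: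
--             msg = f"{cands[0][1]} and {cands[1][1]} tied for matrix space"
--             raise ValueError(msg)
--         winners.append((rich_param, cands[0][1]))
--     result = defaultdict(set)
--     for name, coords in simple_items:
--         if any(rich_coords <= coords for rich_coords in rich.values()):
--             result[name] = set()
--     for rich_param, name in winners:
--         result[name].add(rich_param)
--     return result
-- ===== Notes on version B (the rewrite author's own statement) =====
-- stated objective: simpler
-- what changed: B drops A's rich_to_simple reverse graph and its later removal loop: for each rich param it sorts the matching simple params once and assigns the rich param directly to the unique smallest one, then seeds empty sets for every matched simple param and fills in the winners.
import Mathlib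
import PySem

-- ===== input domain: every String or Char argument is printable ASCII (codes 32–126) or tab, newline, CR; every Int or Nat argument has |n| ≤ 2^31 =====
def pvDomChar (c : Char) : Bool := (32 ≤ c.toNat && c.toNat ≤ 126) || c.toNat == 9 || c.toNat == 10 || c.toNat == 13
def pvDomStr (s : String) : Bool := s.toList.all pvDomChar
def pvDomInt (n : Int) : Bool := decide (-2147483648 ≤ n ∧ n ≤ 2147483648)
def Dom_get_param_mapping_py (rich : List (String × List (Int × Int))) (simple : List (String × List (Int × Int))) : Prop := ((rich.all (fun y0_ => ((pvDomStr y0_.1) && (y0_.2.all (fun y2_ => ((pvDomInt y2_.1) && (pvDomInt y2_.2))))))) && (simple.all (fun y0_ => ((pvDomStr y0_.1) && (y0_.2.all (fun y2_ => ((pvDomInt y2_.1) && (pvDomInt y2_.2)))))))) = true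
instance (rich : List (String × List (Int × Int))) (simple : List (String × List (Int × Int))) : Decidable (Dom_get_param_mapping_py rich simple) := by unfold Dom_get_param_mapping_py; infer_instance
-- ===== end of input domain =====

-- B replaces A's rich_to_simple reverse graph and its removal loop by picking,
-- once per rich param, the unique smallest matching simple param directly
-- (objective: simpler).  Equality is about the return value; A mutates nothing.

-- ===== PORT A =====
-- body of the first double loop; 'simple[simple_param]' / 'rich[rich_param]'
-- are the iterated pair's own values (a Python dict has unique keys)
def pvAPass1Step (sp : String × List (Int × Int))
    (st : PySem.Dict String (PySem.Set String) × PySem.Dict String (PySem.Set String))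
    (rp : String × List (Int × Int)) :
    PySem.Dict String (PySem.Set String) × PySem.Dict String (PySem.Set String) :=
  if PySem.Set.issubset rp.2 sp.2 then
    (st.1.modify sp.1 [] (fun s => PySem.Set.add s rp.1),
     st.2.modify rp.1 [] (fun s => PySem.Set.add s sp.1))
  else st

-- sized_simple, sorted; Python sorts (int, str) tuples lexicographically
-- (= toLex).  Iterating the set in insertion order before sorting is exact:
-- the names are pairwise distinct, so the sort's result ignores input order.
def pvASized (simple : List (String × List (Int × Int))) (counterparts : PySem.Set String) :
    List (Int × String) :=
  PySem.List.sorted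
    (counterparts.map (fun p => (PySem.Set.len ((PySem.Dict.mk simple).getD p []), p)))
    (fun c => toLex c)

-- one iteration of the second loop; 'simple_to_rich[simple_param].remove(rich_param)'
-- is ported as discard — the element is always present there;
-- 'rich_to_simple[rich_param] = [chosen]' is never read again and is dropped
def pvAPass2Step (simple : List (String × List (Int × Int)))
    (s2r : PySem.Dict String (PySem.Set String)) (item : String × PySem.Set String) :
    PySem.Dict String (PySem.Set String) :=
  if item.2.length == 1 then s2r
  else
    match pvASized simple item.2 with
    | [] => s2r                     -- unreachable: counterpart sets are nonempty
    | c0 :: rest =>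
      match rest with
      | [] => s2r                   -- unreachable: length ≠ 1 here
      | c1 :: _ =>
        if c0.1 == c1.1 then s2r    -- Python: raise ValueError (tie); excluded by Pre_
        else
          rest.foldl (fun s2r q => s2r.modify q.2 [] (fun s => PySem.Set.discard s item.1)) s2r

def get_param_mapping_py (rich : List (String × List (Int × Int))) (simple : List (String × List (Int × Int))) : List (String × List String) :=
  -- 'assert len(rich) >= len(simple)': AssertionError excluded by Pre_
  let pass1 := simple.foldl (fun st sp => rich.foldl (pvAPass1Step sp) st)
      (PySem.Dict.empty, PySem.Dict.empty)
  (pass1.2.items.foldl (pvAPass2Step simple) pass1.1).items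

-- ===== PORT B =====
-- sorted candidate list of one rich param: (len(coords), name) for each
-- matching simple param, Python tuple sort = toLex
def pvBSized (rp : String × List (Int × Int)) (simple : List (String × List (Int × Int))) :
    List (Int × String) :=
  PySem.List.sorted
    ((simple.filter (fun sp => PySem.Set.issubset rp.2 sp.2)).map
      (fun sp => ((sp.2.length : Int), sp.1)))
    (fun c => toLex c)

-- one iteration of B's winners loop
def pvBWinnersStep (simple : List (String × List (Int × Int)))
    (ws : List (String × String)) (rp : String × List (Int × Int)) :
    List (String × String) :=
  match pvBSized rp simple with
  | [] => ws
  | c0 :: rest =>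
    match rest with
    | [] => ws ++ [(rp.1, c0.2)]
    | c1 :: _ =>
      if c0.1 == c1.1 then ws       -- Python: raise ValueError (tie); excluded by Pre_
      else ws ++ [(rp.1, c0.2)]

def pvBSeedStep (rich : List (String × List (Int × Int)))
    (d : PySem.Dict String (PySem.Set String)) (sp : String × List (Int × Int)) :
    PySem.Dict String (PySem.Set String) :=
  if rich.any (fun rp => PySem.Set.issubset rp.2 sp.2) then d.insert sp.1 [] else d

def pvBFillStep (d : PySem.Dict String (PySem.Set String)) (w : String × String) :
    PySem.Dict String (PySem.Set String) :=
  d.modify w.2 [] (fun s => PySem.Set.add s w.1)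

def get_param_mapping_py_alt (rich : List (String × List (Int × Int))) (simple : List (String × List (Int × Int))) : List (String × List String) :=
  -- 'assert len(rich) >= len(simple)': AssertionError excluded by Pre_
  let winners := rich.foldl (pvBWinnersStep simple) []
  let seeded := simple.foldl (pvBSeedStep rich) PySem.Dict.empty
  (winners.foldl pvBFillStep seeded).items

-- ===== PRECONDITION & SPEC =====
-- Excluded: the failing assert (more simple than rich params → AssertionError),
-- the tie (two matching simple params of minimal coord-set size → ValueError),
-- and association lists with duplicate keys, which do not arise from Python
-- dict arguments (a dict has unique keys), so nothing A returns on is lost.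
def Pre_get_param_mapping_py (rich : List (String × List (Int × Int))) (simple : List (String × List (Int × Int))) : Prop :=
  simple.length ≤ rich.length ∧
  (rich.map Prod.fst).Nodup ∧ (simple.map Prod.fst).Nodup ∧
  (rich.all (fun rp =>
    match ((simple.filter (fun sp => PySem.Set.issubset rp.2 sp.2)).map
        (fun sp => ((sp.2.length : Int)))).min? with
    | none => true
    | some m => decide ((((simple.filter (fun sp => PySem.Set.issubset rp.2 sp.2)).map
        (fun sp => ((sp.2.length : Int)))).count m) ≤ 1))) = true
instance (rich : List (String × List (Int × Int))) (simple : List (String × List (Int × Int))) : Decidable (Pre_get_param_mapping_py rich simple) := by unfold Pre_get_param_mapping_py; infer_instance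

def pvWitness_get_param_mapping_py : (List (String × List (Int × Int))) × (List (String × List (Int × Int))) :=
  ([("r0", [(0, 0)]), ("r1", [(1, 1)])], [("s0", [(0, 0), (1, 1)])])

def Spec_get_param_mapping_py (rich : List (String × List (Int × Int))) (simple : List (String × List (Int × Int))) (out : List (String × List String)) : Prop := out = get_param_mapping_py_alt rich simple
instance (rich : List (String × List (Int × Int))) (simple : List (String × List (Int × Int))) (out : List (String × List String)) : Decidable (Spec_get_param_mapping_py rich simple out) := by unfold Spec_get_param_mapping_py; infer_instance

-- ===== CLAIM (what is proved, stated in full; the proofs are below) =====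
def Claim_equal_get_param_mapping_py : Prop := ∀ (rich : List (String × List (Int × Int))) (simple : List (String × List (Int × Int))), Dom_get_param_mapping_py rich simple → Pre_get_param_mapping_py rich simple → Spec_get_param_mapping_py rich simple (get_param_mapping_py rich simple)

-- ===== LEMMAS AND PROOFS =====

-- abbreviations for the proofs
def pvM (rp sp : String × List (Int × Int)) : Bool := PySem.Set.issubset rp.2 sp.2

def pvValS (rich : List (String × List (Int × Int))) (sp : String × List (Int × Int)) : List String :=
  (rich.filter (fun rp => pvM rp sp)).map (·.1)

def pvCnt (rich simple : List (String × List (Int × Int))) (q : String) : List String :=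
  (simple.filter (fun sp => rich.any (fun rp => rp.1 == q && pvM rp sp))).map (·.1)

def pvMS (rich simple : List (String × List (Int × Int))) : List (String × List (Int × Int)) :=
  simple.filter (fun sp => rich.any (fun rp => pvM rp sp))

def pvRKeys (rich simple : List (String × List (Int × Int))) : List String :=
  PySem.Set.ofList (simple.flatMap (fun sp => (rich.filter (fun rp => pvM rp sp)).map (·.1)))

-- value-level mirror of pvAPass2Step at key p
def pvRemP (simple : List (String × List (Int × Int))) (p : String)
    (item : String × PySem.Set String) : Bool :=
  if item.2.length == 1 then false
  else
    match pvASized simple item.2 with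
    | [] => false
    | c0 :: rest =>
      match rest with
      | [] => false
      | c1 :: _ =>
        if c0.1 == c1.1 then false
        else decide (p ∈ rest.map (·.2))

-- S2R / R2S, the two components of pass 1
def pvS2RInner (rich : List (String × List (Int × Int))) (sp : String × List (Int × Int))
    (d : PySem.Dict String (PySem.Set String)) : PySem.Dict String (PySem.Set String) :=
  rich.foldl (fun d rp => if pvM rp sp then d.modify sp.1 [] (fun s => PySem.Set.add s rp.1) else d) d

def pvS2R (rich simple : List (String × List (Int × Int))) : PySem.Dict String (PySem.Set String) :=
  simple.foldl (fun d sp => pvS2RInner rich sp d) PySem.Dict.empty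

def pvR2SInner (rich : List (String × List (Int × Int))) (sp : String × List (Int × Int))
    (d : PySem.Dict String (PySem.Set String)) : PySem.Dict String (PySem.Set String) :=
  rich.foldl (fun d rp => if pvM rp sp then d.modify rp.1 [] (fun s => PySem.Set.add s sp.1) else d) d

def pvR2S (rich simple : List (String × List (Int × Int))) : PySem.Dict String (PySem.Set String) :=
  simple.foldl (fun d sp => pvR2SInner rich sp d) PySem.Dict.empty

-- L1: pass 1 splits into the two independent folds
theorem pvL1 (rich simple : List (String × List (Int × Int))) :
    simple.foldl (fun st sp => rich.foldl (pvAPass1Step sp) st)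
      ((PySem.Dict.empty : PySem.Dict String (PySem.Set String)),
       (PySem.Dict.empty : PySem.Dict String (PySem.Set String)))
    = (pvS2R rich simple, pvR2S rich simple) := by
  have h : ∀ sp : String × List (Int × Int),
      pvAPass1Step sp = (fun (st : PySem.Dict String (PySem.Set String) × PySem.Dict String (PySem.Set String)) rp =>
        ((fun (d : PySem.Dict String (PySem.Set String)) (rp : String × List (Int × Int)) =>
            if pvM rp sp then d.modify sp.1 [] (fun s => PySem.Set.add s rp.1) else d) st.1 rp,
         (fun (d : PySem.Dict String (PySem.Set String)) (rp : String × List (Int × Int)) =>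
            if pvM rp sp then d.modify rp.1 [] (fun s => PySem.Set.add s sp.1) else d) st.2 rp)) := by
    intro sp; funext st rp; simp only [pvAPass1Step, pvM]; split <;> rfl
  have h2 : (fun (st : PySem.Dict String (PySem.Set String) × PySem.Dict String (PySem.Set String)) sp =>
        List.foldl (pvAPass1Step sp) st rich)
      = fun st sp => (pvS2RInner rich sp st.1, pvR2SInner rich sp st.2) := by
    funext st sp
    obtain ⟨a, b⟩ := st
    rw [h sp, PySem.List.foldl_prod_mk
      (f := fun (d : PySem.Dict String (PySem.Set String)) (rp : String × List (Int × Int)) =>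
        if pvM rp sp then d.modify sp.1 [] (fun s => PySem.Set.add s rp.1) else d)
      (g := fun (d : PySem.Dict String (PySem.Set String)) (rp : String × List (Int × Int)) =>
        if pvM rp sp then d.modify rp.1 [] (fun s => PySem.Set.add s sp.1) else d)]
    rfl
  rw [h2, PySem.List.foldl_prod_mk (f := fun d sp => pvS2RInner rich sp d) (g := fun d sp => pvR2SInner rich sp d)]
  rfl

-- L2/L3: inner S2R fold
theorem pvL2 (rich : List (String × List (Int × Int))) (sp : String × List (Int × Int))
    (d : PySem.Dict String (PySem.Set String)) (p : String) :
    (pvS2RInner rich sp d).getD p [] =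
      if p = sp.1 then PySem.Set.update (d.getD sp.1 []) (pvValS rich sp) else d.getD p [] := by
  induction rich generalizing d with
  | nil =>
    simp only [pvS2RInner, List.foldl_nil, pvValS, List.filter_nil, List.map_nil,
      PySem.Set.update]
    split
    · next hp => subst hp; rfl
    · rfl
  | cons rp t ih =>
    simp only [pvS2RInner, List.foldl_cons] at *
    by_cases hm : pvM rp sp
    · rw [if_pos hm, ih]
      simp only [pvValS, List.filter_cons, hm, if_pos, List.map_cons]
      split
      · next hp =>
        subst hp
        rw [PySem.Set.update_cons, PySem.Dict.getD_modify_self]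
      · next hp =>
        rw [PySem.Dict.getD_modify]
        rw [if_neg hp]
    · rw [if_neg hm, ih]
      simp only [pvValS, List.filter_cons]
      simp [hm]

theorem pvL3 (rich : List (String × List (Int × Int))) (sp : String × List (Int × Int))
    (d : PySem.Dict String (PySem.Set String)) :
    (pvS2RInner rich sp d).keys =
      if rich.any (fun rp => pvM rp sp) then PySem.Set.add d.keys sp.1 else d.keys := by
  induction rich generalizing d with
  | nil => simp [pvS2RInner]
  | cons rp t ih =>
    simp only [pvS2RInner, List.foldl_cons] at *
    by_cases hm : pvM rp sp
    · rw [if_pos hm, ih]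
      have hk : (d.modify sp.1 [] (fun s => PySem.Set.add s rp.1)).keys = PySem.Set.add d.keys sp.1 := by
        rw [PySem.Dict.keys_modify]
        by_cases hc : d.contains sp.1
        · rw [PySem.Dict.keys_insert_of_contains _ _ hc, PySem.Set.add_of_mem]
          exact (PySem.Dict.contains_iff_mem_keys _ _).1 hc
        · have hc' : d.contains sp.1 = false := by simpa using hc
          rw [PySem.Dict.keys_insert_of_not_contains _ _ hc']
          rw [PySem.Set.add_eq_ite, if_neg]
          intro hmem
          exact hc ((PySem.Dict.contains_iff_mem_keys _ _).2 hmem)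
      rw [hk]
      simp only [List.any_cons, hm, Bool.true_or, if_pos]
      split
      · next h2 =>
        rw [PySem.Set.add_of_mem (show sp.1 ∈ PySem.Set.add d.keys sp.1 by
          rw [PySem.Set.mem_add]; right; rfl)]
      · next h2 => rfl
    · rw [if_neg hm, ih]
      simp only [List.any_cons, Bool.eq_false_iff.2 hm, Bool.false_or]


-- keys of a modify / insert at key k are the old keys with k added
theorem pvKeysModify (d : PySem.Dict String (PySem.Set String)) (k : String)
    (f : PySem.Set String → PySem.Set String) :
    (d.modify k [] f).keys = PySem.Set.add d.keys k := by
  rw [PySem.Dict.keys_modify]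
  by_cases hc : d.contains k
  · rw [PySem.Dict.keys_insert_of_contains _ _ hc, PySem.Set.add_of_mem]
    exact (PySem.Dict.contains_iff_mem_keys _ _).1 hc
  · have hc' : d.contains k = false := by simpa using hc
    rw [PySem.Dict.keys_insert_of_not_contains _ _ hc']
    rw [PySem.Set.add_eq_ite, if_neg]
    intro hmem
    exact hc ((PySem.Dict.contains_iff_mem_keys _ _).2 hmem)

theorem pvKeysInsert (d : PySem.Dict String (PySem.Set String)) (k : String) (v : PySem.Set String) :
    (d.insert k v).keys = PySem.Set.add d.keys k := by
  by_cases hc : d.contains k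
  · rw [PySem.Dict.keys_insert_of_contains _ _ hc, PySem.Set.add_of_mem]
    exact (PySem.Dict.contains_iff_mem_keys _ _).1 hc
  · have hc' : d.contains k = false := by simpa using hc
    rw [PySem.Dict.keys_insert_of_not_contains _ _ hc']
    rw [PySem.Set.add_eq_ite, if_neg]
    intro hmem
    exact hc ((PySem.Dict.contains_iff_mem_keys _ _).2 hmem)

-- L4/L5: outer S2R fold
theorem pvL4 (rich simple : List (String × List (Int × Int)))
    (hnd : (simple.map Prod.fst).Nodup) (d : PySem.Dict String (PySem.Set String)) (p : String) :
    (simple.foldl (fun d sp => pvS2RInner rich sp d) d).getD p [] =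
      match simple.find? (fun sp => sp.1 == p) with
      | some sp => PySem.Set.update (d.getD p []) (pvValS rich sp)
      | none => d.getD p [] := by
  induction simple generalizing d with
  | nil => simp
  | cons sp rest ih =>
    rw [List.map_cons, List.nodup_cons] at hnd
    have hnd' : (rest.map Prod.fst).Nodup := hnd.2
    have hsp : sp.1 ∉ rest.map Prod.fst := hnd.1
    simp only [List.foldl_cons, List.find?_cons]
    by_cases hp : sp.1 = p
    · subst hp
      rw [ih hnd']
      have hnone : rest.find? (fun sp' => sp'.1 == sp.1) = none := by
        rw [List.find?_eq_none]
        intro x hx hbx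
        exact hsp (by
          have : x.1 = sp.1 := by simpa using hbx
          exact this ▸ List.mem_map_of_mem hx)
      rw [hnone]
      simp only [beq_self_eq_true]
      rw [pvL2, if_pos rfl]
    · have hb : (sp.1 == p) = false := by simpa using hp
      rw [hb]
      rw [ih hnd']
      have hgd : (pvS2RInner rich sp d).getD p [] = d.getD p [] := by
        rw [pvL2, if_neg (fun h => hp h.symm)]
      cases hfind : rest.find? (fun sp' => sp'.1 == p) with
      | none => simp only []; exact hgd
      | some sp' =>
        simp only [hgd]

theorem pvL5 (rich simple : List (String × List (Int × Int)))
    (d : PySem.Dict String (PySem.Set String)) :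
    (simple.foldl (fun d sp => pvS2RInner rich sp d) d).keys =
      PySem.Set.update d.keys ((pvMS rich simple).map (·.1)) := by
  induction simple generalizing d with
  | nil => simp [pvMS, PySem.Set.update_nil]
  | cons sp rest ih =>
    simp only [List.foldl_cons]
    rw [ih]
    simp only [pvMS, List.filter_cons]
    by_cases ha : rich.any (fun rp => pvM rp sp)
    · rw [pvL3, if_pos ha]
      simp only [ha, if_pos, List.map_cons]
      rw [PySem.Set.update_cons]
    · rw [pvL3, if_neg ha]
      simp only [Bool.eq_false_iff.2 ha]
      simp

-- L6/L7: inner R2S fold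
theorem pvL6 (rich : List (String × List (Int × Int))) (sp : String × List (Int × Int))
    (d : PySem.Dict String (PySem.Set String)) (q : String) :
    (pvR2SInner rich sp d).getD q [] =
      if rich.any (fun rp => rp.1 == q && pvM rp sp) then PySem.Set.add (d.getD q []) sp.1
      else d.getD q [] := by
  induction rich generalizing d with
  | nil => simp [pvR2SInner]
  | cons rp t ih =>
    simp only [pvR2SInner, List.foldl_cons] at *
    by_cases hm : pvM rp sp
    · rw [if_pos hm]
      by_cases hq : rp.1 = q
      · subst hq
        rw [ih]
        simp only [List.any_cons, hm, beq_self_eq_true, Bool.true_and, Bool.true_or, if_pos]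
        rw [PySem.Dict.getD_modify_self]
        split
        · rw [PySem.Set.add_of_mem (show sp.1 ∈ PySem.Set.add (d.getD rp.1 []) sp.1 by
            rw [PySem.Set.mem_add]; right; rfl)]
        · rfl
      · rw [ih]
        have hgd : (d.modify rp.1 [] (fun s => PySem.Set.add s sp.1)).getD q [] = d.getD q [] := by
          rw [PySem.Dict.getD_modify, if_neg (fun h => hq h.symm)]
        rw [hgd]
        have hb : (rp.1 == q) = false := by simpa using hq
        simp only [List.any_cons, hb, Bool.false_and, Bool.false_or]
    · rw [if_neg hm]
      rw [ih]
      simp only [List.any_cons, Bool.eq_false_iff.2 hm, Bool.and_false, Bool.false_or]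

theorem pvL7 (rich : List (String × List (Int × Int))) (sp : String × List (Int × Int))
    (d : PySem.Dict String (PySem.Set String)) :
    (pvR2SInner rich sp d).keys =
      PySem.Set.update d.keys ((rich.filter (fun rp => pvM rp sp)).map (·.1)) := by
  induction rich generalizing d with
  | nil => simp [pvR2SInner, PySem.Set.update_nil]
  | cons rp t ih =>
    simp only [pvR2SInner, List.foldl_cons] at *
    by_cases hm : pvM rp sp
    · rw [if_pos hm, ih]
      rw [pvKeysModify]
      simp only [List.filter_cons, hm, if_pos, List.map_cons]
      rw [PySem.Set.update_cons]
    · rw [if_neg hm, ih]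
      simp only [List.filter_cons, Bool.eq_false_iff.2 hm]
      simp

-- L8/L9: outer R2S fold
theorem pvL8 (rich simple : List (String × List (Int × Int)))
    (d : PySem.Dict String (PySem.Set String)) (q : String) :
    (simple.foldl (fun d sp => pvR2SInner rich sp d) d).getD q [] =
      PySem.Set.update (d.getD q []) (pvCnt rich simple q) := by
  induction simple generalizing d with
  | nil => simp [pvCnt, PySem.Set.update_nil]
  | cons sp rest ih =>
    simp only [List.foldl_cons]
    rw [ih]
    simp only [pvCnt, List.filter_cons]
    by_cases ha : rich.any (fun rp => rp.1 == q && pvM rp sp)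
    · rw [pvL6, if_pos ha]
      simp only [ha, if_pos, List.map_cons]
      rw [PySem.Set.update_cons]
    · rw [pvL6, if_neg ha]
      simp only [Bool.eq_false_iff.2 ha]
      simp

theorem pvL9 (rich simple : List (String × List (Int × Int)))
    (d : PySem.Dict String (PySem.Set String)) :
    (simple.foldl (fun d sp => pvR2SInner rich sp d) d).keys =
      PySem.Set.update d.keys (simple.flatMap (fun sp => (rich.filter (fun rp => pvM rp sp)).map (·.1))) := by
  induction simple generalizing d with
  | nil => simp [PySem.Set.update_nil]
  | cons sp rest ih =>
    simp only [List.foldl_cons, List.flatMap_cons]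
    rw [ih, pvL7, PySem.Set.update_append]


theorem pvDiscardIdem (s : PySem.Set String) (r : String) :
    PySem.Set.discard (PySem.Set.discard s r) r = PySem.Set.discard s r := by
  simp only [PySem.Set.discard, List.filter_filter, Bool.and_self]

-- the removal fold of one pass-2 step, at key p
theorem pvL10a (r : String) (rest : List (Int × String))
    (d : PySem.Dict String (PySem.Set String)) (p : String) :
    (rest.foldl (fun d q => d.modify q.2 [] (fun s => PySem.Set.discard s r)) d).getD p [] =
      if p ∈ rest.map (·.2) then PySem.Set.discard (d.getD p []) r else d.getD p [] := by
  induction rest generalizing d with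
  | nil => simp
  | cons q rest' ih =>
    simp only [List.foldl_cons, List.map_cons, List.mem_cons]
    rw [ih]
    by_cases hp : p = q.2
    · subst hp
      rw [PySem.Dict.getD_modify_self]
      simp only [true_or, if_pos]
      split
      · rw [pvDiscardIdem]
      · rfl
    · have hgd : (d.modify q.2 [] (fun s => PySem.Set.discard s r)).getD p [] = d.getD p [] := by
        rw [PySem.Dict.getD_modify, if_neg hp]
      rw [hgd]
      simp only [hp, false_or]

-- L10: pass 2 lifted to the value at key p
theorem pvL10 (simple : List (String × List (Int × Int))) (L : List (String × PySem.Set String))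
    (d : PySem.Dict String (PySem.Set String)) (p : String) :
    (L.foldl (pvAPass2Step simple) d).getD p [] =
      L.foldl (fun s item => if pvRemP simple p item then PySem.Set.discard s item.1 else s)
        (d.getD p []) := by
  induction L generalizing d with
  | nil => rfl
  | cons item L ih =>
    simp only [List.foldl_cons]
    rw [ih]
    have hstep : (pvAPass2Step simple d item).getD p [] =
        if pvRemP simple p item then PySem.Set.discard (d.getD p []) item.1 else d.getD p [] := by
      unfold pvAPass2Step pvRemP
      by_cases h1 : item.2.length == 1
      · simp [h1]
      · simp only [h1, Bool.false_eq_true, if_false]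
        cases hs : pvASized simple item.2 with
        | nil => simp
        | cons c0 rest =>
          cases rest with
          | nil => simp
          | cons c1 rest' =>
            by_cases ht : c0.1 == c1.1
            · simp [ht]
            · simp only [ht, Bool.false_eq_true, if_false]
              rw [pvL10a]
              split
              · next hmem => rw [if_pos (by simpa using hmem)]
              · next hmem => rw [if_neg (by simpa using hmem)]
    rw [hstep]


theorem pvL11a (r : String) (l : List (Int × String)) (d : PySem.Dict String (PySem.Set String))
    (h : ∀ q ∈ l, q.2 ∈ d.keys) :
    (l.foldl (fun d q => d.modify q.2 [] (fun s => PySem.Set.discard s r)) d).keys = d.keys := by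
  induction l generalizing d with
  | nil => rfl
  | cons q qs ih =>
    simp only [List.foldl_cons]
    have hk : (d.modify q.2 [] (fun s => PySem.Set.discard s r)).keys = d.keys := by
      rw [pvKeysModify, PySem.Set.add_of_mem (h q List.mem_cons_self)]
    rw [ih _ (fun q' hq' => by rw [hk]; exact h q' (List.mem_cons_of_mem _ hq')), hk]

-- L11: pass 2 never changes the key list (every touched key is present)
theorem pvL11 (simple : List (String × List (Int × Int))) (L : List (String × PySem.Set String))
    (d : PySem.Dict String (PySem.Set String))
    (h : ∀ item ∈ L, ∀ q ∈ item.2, q ∈ d.keys) :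
    (L.foldl (pvAPass2Step simple) d).keys = d.keys := by
  induction L generalizing d with
  | nil => rfl
  | cons item L ih =>
    simp only [List.foldl_cons]
    have hstep : (pvAPass2Step simple d item).keys = d.keys := by
      unfold pvAPass2Step
      by_cases h1 : item.2.length == 1
      · simp [h1]
      · simp only [h1, Bool.false_eq_true, if_false]
        cases hs : pvASized simple item.2 with
        | nil => simp
        | cons c0 rest =>
          cases rest with
          | nil => simp
          | cons c1 rest' =>
            by_cases ht : c0.1 == c1.1
            · simp [ht]
            · simp only [ht, Bool.false_eq_true, if_false]
              have hsub : ∀ q ∈ (c1 :: rest'), q.2 ∈ d.keys := by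
                intro q hq
                have hmem : q ∈ pvASized simple item.2 := by
                  rw [hs]; exact List.mem_cons_of_mem _ hq
                have hperm := PySem.List.sorted_perm
                  (item.2.map (fun p => (PySem.Set.len ((PySem.Dict.mk simple).getD p []), p)))
                  (fun c => toLex c) false
                have : q ∈ item.2.map (fun p => (PySem.Set.len ((PySem.Dict.mk simple).getD p []), p)) :=
                  hperm.mem_iff.1 hmem
                obtain ⟨x, hx, hq2⟩ := List.mem_map.1 this
                have : q.2 = x := by rw [← hq2]
                exact this ▸ h item (List.mem_cons_self) x hx
              exact pvL11a _ _ _ hsub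
    rw [ih _ (fun i hi x hx => by rw [hstep]; exact h i (List.mem_cons_of_mem _ hi) x hx), hstep]

-- L12/L13: B's seed fold
theorem pvL12 (rich simple : List (String × List (Int × Int)))
    (d : PySem.Dict String (PySem.Set String)) (p : String) :
    (simple.foldl (pvBSeedStep rich) d).getD p [] =
      if p ∈ (pvMS rich simple).map (·.1) then ([] : PySem.Set String) else d.getD p [] := by
  induction simple generalizing d with
  | nil => simp [pvMS]
  | cons sp rest ih =>
    simp only [List.foldl_cons]
    rw [ih]
    simp only [pvMS, List.filter_cons, pvM]
    by_cases ha : rich.any (fun rp => PySem.Set.issubset rp.2 sp.2)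
    · simp only [ha, if_pos, List.map_cons, List.mem_cons]
      unfold pvBSeedStep
      rw [if_pos ha]
      by_cases hp : p ∈ ((rest.filter (fun sp => rich.any (fun rp => PySem.Set.issubset rp.2 sp.2))).map (·.1))
      · rw [if_pos hp, if_pos (Or.inr hp)]
      · rw [if_neg hp]
        by_cases hsp : p = sp.1
        · rw [if_pos (Or.inl hsp), PySem.Dict.getD_insert, if_pos hsp]
        · rw [if_neg (by simp [hsp, hp]), PySem.Dict.getD_insert, if_neg hsp]
    · have ha' : rich.any (fun rp => PySem.Set.issubset rp.2 sp.2) = false := by simpa using ha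
      simp only [ha', Bool.false_eq_true, if_false]
      unfold pvBSeedStep
      rw [if_neg ha]
      rfl

theorem pvL13 (rich simple : List (String × List (Int × Int)))
    (d : PySem.Dict String (PySem.Set String)) :
    (simple.foldl (pvBSeedStep rich) d).keys =
      PySem.Set.update d.keys ((pvMS rich simple).map (·.1)) := by
  induction simple generalizing d with
  | nil => simp [pvMS, PySem.Set.update_nil]
  | cons sp rest ih =>
    simp only [List.foldl_cons]
    rw [ih]
    simp only [pvMS, List.filter_cons, pvM]
    by_cases ha : rich.any (fun rp => PySem.Set.issubset rp.2 sp.2)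
    · simp only [ha, if_pos, List.map_cons]
      unfold pvBSeedStep
      rw [if_pos ha, pvKeysInsert, PySem.Set.update_cons]
    · have ha' : rich.any (fun rp => PySem.Set.issubset rp.2 sp.2) = false := by simpa using ha
      simp only [ha', Bool.false_eq_true, if_false]
      unfold pvBSeedStep
      rw [if_neg ha]

-- L14/L15: B's fill fold
theorem pvL14 (l : List (String × String)) (d : PySem.Dict String (PySem.Set String)) (p : String) :
    (l.foldl pvBFillStep d).getD p [] =
      PySem.Set.update (d.getD p []) ((l.filter (fun w => w.2 == p)).map (·.1)) := by
  induction l generalizing d with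
  | nil => simp [PySem.Set.update_nil]
  | cons w l ih =>
    simp only [List.foldl_cons, List.filter_cons]
    rw [ih]
    unfold pvBFillStep
    by_cases hp : w.2 = p
    · subst hp
      simp only [beq_self_eq_true, if_pos, List.map_cons]
      rw [PySem.Dict.getD_modify_self, PySem.Set.update_cons]
    · have hb : (w.2 == p) = false := by simpa using hp
      simp only [hb, Bool.false_eq_true, if_false]
      rw [PySem.Dict.getD_modify, if_neg (fun h => hp h.symm)]

theorem pvL15 (l : List (String × String)) (d : PySem.Dict String (PySem.Set String))
    (h : ∀ w ∈ l, w.2 ∈ d.keys) :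
    (l.foldl pvBFillStep d).keys = d.keys := by
  induction l generalizing d with
  | nil => rfl
  | cons w l ih =>
    simp only [List.foldl_cons]
    have hk : (pvBFillStep d w).keys = d.keys := by
      unfold pvBFillStep
      rw [pvKeysModify, PySem.Set.add_of_mem (h w List.mem_cons_self)]
    rw [ih _ (fun w' hw' => by rw [hk]; exact h w' (List.mem_cons_of_mem _ hw')), hk]

-- winners of B as a filterMap over rich
def pvWinF (simple : List (String × List (Int × Int))) (rp : String × List (Int × Int)) :
    Option (String × String) :=
  match pvBSized rp simple with
  | [] => none
  | c0 :: rest =>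
    match rest with
    | [] => some (rp.1, c0.2)
    | c1 :: _ => if c0.1 == c1.1 then none else some (rp.1, c0.2)

theorem pvL16 (simple rich : List (String × List (Int × Int))) (ws : List (String × String)) :
    rich.foldl (pvBWinnersStep simple) ws = ws ++ rich.filterMap (pvWinF simple) := by
  induction rich generalizing ws with
  | nil => simp
  | cons rp t ih =>
    simp only [List.foldl_cons, List.filterMap_cons]
    have hstep : pvBWinnersStep simple ws rp =
        ws ++ (pvWinF simple rp).toList := by
      unfold pvBWinnersStep pvWinF
      cases hs : pvBSized rp simple with
      | nil => simp
      | cons c0 rest =>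
        cases rest with
        | nil => simp
        | cons c1 rest' =>
          by_cases ht : c0.1 == c1.1
          · simp [ht]
          · simp [ht]
    rw [hstep, ih]
    cases hw : pvWinF simple rp with
    | none => simp
    | some w => simp


-- injectivity of names from a Nodup name list
theorem pvNameInj {l : List (String × List (Int × Int))} (h : (l.map Prod.fst).Nodup)
    {a b : String × List (Int × Int)} (ha : a ∈ l) (hb : b ∈ l) (hab : a.1 = b.1) : a = b := by
  by_contra hne
  have hp : l.Pairwise (fun x y => x.1 ≠ y.1) := by
    rw [← List.pairwise_map (f := Prod.fst) (R := (· ≠ ·))]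
    exact h
  exact hp.forall (fun x y hxy => (fun h' => hxy h'.symm)) ha hb hne hab

theorem pvFindName {simple : List (String × List (Int × Int))}
    (hs : (simple.map Prod.fst).Nodup) {sp : String × List (Int × Int)} (hsp : sp ∈ simple) :
    simple.find? (fun sp' => sp'.1 == sp.1) = some sp := by
  induction simple with
  | nil => cases hsp
  | cons a rest ih =>
    rw [List.map_cons, List.nodup_cons] at hs
    rw [List.find?_cons]
    by_cases hb : a.1 = sp.1
    · have : a = sp := by
        rcases List.mem_cons.1 hsp with h | h
        · exact h.symm ▸ rfl
        · exact absurd (hb ▸ List.mem_map_of_mem (f := Prod.fst) h) hs.1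
      simp [this]
    · have hb' : (a.1 == sp.1) = false := by simpa using hb
      rw [hb']
      rcases List.mem_cons.1 hsp with h | h
      · exact absurd (congrArg Prod.fst h.symm) hb
      · exact ih hs.2 h

-- pvMS names are Nodup; pvValS / pvCnt are Nodup
theorem pvMSNamesNodup {rich simple : List (String × List (Int × Int))}
    (hs : (simple.map Prod.fst).Nodup) : ((pvMS rich simple).map (·.1)).Nodup :=
  List.Nodup.sublist (List.Sublist.map _ List.filter_sublist) hs

theorem pvValSNodup {rich : List (String × List (Int × Int))}
    (hr : (rich.map Prod.fst).Nodup) (sp : String × List (Int × Int)) : (pvValS rich sp).Nodup :=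
  List.Nodup.sublist (List.Sublist.map _ List.filter_sublist) hr

theorem pvCntNodup {rich simple : List (String × List (Int × Int))}
    (hs : (simple.map Prod.fst).Nodup) (q : String) : (pvCnt rich simple q).Nodup :=
  List.Nodup.sublist (List.Sublist.map _ List.filter_sublist) hs

-- R2S characterizations from empty
theorem pvR2SKeys (rich simple : List (String × List (Int × Int))) :
    (pvR2S rich simple).keys = pvRKeys rich simple := by
  unfold pvR2S pvRKeys
  rw [pvL9, PySem.Dict.keys_empty]
  exact PySem.Set.update_empty _

theorem pvR2SgetD (rich simple : List (String × List (Int × Int)))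
    (hs : (simple.map Prod.fst).Nodup) (q : String) :
    (pvR2S rich simple).getD q [] = pvCnt rich simple q := by
  unfold pvR2S
  rw [pvL8, PySem.Dict.getD_empty]
  rw [show (PySem.Set.update ([] : PySem.Set String) (pvCnt rich simple q))
      = PySem.Set.ofList (pvCnt rich simple q) from PySem.Set.update_empty _]
  exact PySem.Set.ofList_eq_self_of_nodup _ (pvCntNodup hs q)

theorem pvR2SItems (rich simple : List (String × List (Int × Int)))
    (hs : (simple.map Prod.fst).Nodup) :
    (pvR2S rich simple).items =
      (pvRKeys rich simple).map (fun q => (q, (pvCnt rich simple q : PySem.Set String))) := by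
  rw [PySem.Dict.items_eq_map_keys _ (by rw [pvR2SKeys]; exact PySem.Set.nodup_ofList _) []]
  rw [pvR2SKeys]
  exact List.map_congr_left (fun q _ => by rw [pvR2SgetD rich simple hs q])

-- fold of conditional discards = one filter
theorem pvL18 (c : String × PySem.Set String → Bool) (L : List (String × PySem.Set String))
    (s0 : PySem.Set String) :
    L.foldl (fun s item => if c item then PySem.Set.discard s item.1 else s) s0 =
      s0.filter (fun x => !(L.any (fun item => c item && item.1 == x))) := by
  induction L generalizing s0 with
  | nil => simp
  | cons item L ih =>
    simp only [List.foldl_cons, List.any_cons]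
    rw [ih]
    by_cases hc : c item
    · rw [if_pos hc]
      simp only [PySem.Set.discard, List.filter_filter]
      apply List.filter_congr
      intro x _
      simp only [hc, Bool.true_and, Bool.not_or]
      rw [Bool.and_comm, BEq.comm]
    · rw [if_neg hc]
      apply List.filter_congr
      intro x _
      simp [Bool.eq_false_iff.2 hc]

-- any over the R2S item list at a present key x reduces to the predicate at x
theorem pvAnyItems (rich simple : List (String × List (Int × Int))) (g : String × PySem.Set String → Bool)
    {x : String} (hx : x ∈ pvRKeys rich simple) :
    ((pvRKeys rich simple).map (fun q => (q, (pvCnt rich simple q : PySem.Set String)))).any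
        (fun item => g item && item.1 == x) = g (x, pvCnt rich simple x) := by
  rw [List.any_map]
  cases hgx : g (x, pvCnt rich simple x)
  · rw [List.any_eq_false]
    intro q hq
    simp only [Function.comp]
    by_cases hqx : q = x
    · subst hqx; simp [hgx]
    · simp [hqx]
  · rw [List.any_eq_true]
    exact ⟨x, hx, by simp [hgx]⟩

-- B winners, filtered to target p, as a filter over rich
def pvBKeep (simple : List (String × List (Int × Int))) (p : String)
    (rp : String × List (Int × Int)) : Bool :=
  match pvWinF simple rp with
  | some w => w.2 == p
  | none => false

theorem pvL19 (rich simple : List (String × List (Int × Int))) (p : String) :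
    ((rich.filterMap (pvWinF simple)).filter (fun w => w.2 == p)).map (·.1) =
      (rich.filter (pvBKeep simple p)).map (·.1) := by
  induction rich with
  | nil => rfl
  | cons rp t ih =>
    simp only [List.filterMap_cons, List.filter_cons]
    cases hw : pvWinF simple rp with
    | none =>
      simp only [pvBKeep, hw]
      simpa using ih
    | some w =>
      simp only [pvBKeep, hw, List.filter_cons]
      by_cases hp : w.2 == p
      · have hw1 : w.1 = rp.1 := by
          unfold pvWinF at hw
          cases hs : pvBSized rp simple with
          | nil => rw [hs] at hw; cases hw
          | cons c0 rest =>
            rw [hs] at hw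
            cases rest with
            | nil => cases hw; rfl
            | cons c1 rest' =>
              by_cases ht : c0.1 == c1.1
              · simp only [ht, if_pos] at hw; cases hw
              · simp only [ht, Bool.false_eq_true, if_false] at hw; cases hw; rfl
        simp only [hp, if_pos, List.map_cons, hw1]
        rw [ih]
      · have hp' : (w.2 == p) = false := by simpa using hp
        simp only [hp', Bool.false_eq_true, if_false]
        exact ih


-- with unique rich names, the counterpart set of rich param rp is the list of
-- simple params whose coords contain rp's coords
theorem pvF1 {rich simple : List (String × List (Int × Int))}
    (hr : (rich.map Prod.fst).Nodup) {rp : String × List (Int × Int)} (hrp : rp ∈ rich) :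
    pvCnt rich simple rp.1 = (simple.filter (fun sp' => pvM rp sp')).map (·.1) := by
  unfold pvCnt
  congr 1
  apply List.filter_congr
  intro sp' _
  cases hm : pvM rp sp'
  · rw [List.any_eq_false]
    intro rp' hrp'
    by_cases hq : rp'.1 = rp.1
    · have : rp' = rp := pvNameInj hr hrp' hrp hq
      subst this
      simp [hm]
    · simp [hq]
  · rw [List.any_eq_true]
    exact ⟨rp, hrp, by simp [hm]⟩

-- A's sized list of rp's counterparts is B's sorted candidate list of rp
theorem pvSizedEq {rich simple : List (String × List (Int × Int))}
    (hr : (rich.map Prod.fst).Nodup) (hs : (simple.map Prod.fst).Nodup)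
    {rp : String × List (Int × Int)} (hrp : rp ∈ rich) :
    pvASized simple (pvCnt rich simple rp.1) = pvBSized rp simple := by
  unfold pvASized pvBSized
  rw [pvF1 hr hrp, List.map_map]
  congr 1
  apply List.map_congr_left
  intro sp' hsp'
  have hsp'' : sp' ∈ simple := List.mem_of_mem_filter hsp'
  have hget : (PySem.Dict.mk simple).getD sp'.1 [] = sp'.2 := by
    apply PySem.Dict.getD_of_mem_items
    · show (sp'.1, sp'.2) ∈ simple
      simpa using hsp''
    · rw [PySem.Dict.keys_mk]
      exact hs
  simp only [Function.comp]
  rw [hget]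
  rfl

-- the candidate list, viewed through the components
theorem pvMemSized {simple : List (String × List (Int × Int))}
    {rp : String × List (Int × Int)} {c : Int × String}
    (hc : c ∈ pvBSized rp simple) :
    ∃ sp' ∈ simple, pvM rp sp' = true ∧ sp'.1 = c.2 := by
  unfold pvBSized at hc
  have := (PySem.List.sorted_perm _ _ _).mem_iff.1 hc
  obtain ⟨sp', hsp', heq⟩ := List.mem_map.1 this
  refine ⟨sp', List.mem_of_mem_filter hsp', by simpa [pvM] using List.of_mem_filter hsp', ?_⟩
  rw [← heq]

theorem pvSizedSnd (simple : List (String × List (Int × Int)))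
    (rp : String × List (Int × Int)) :
    ((pvBSized rp simple).map (·.2)).Perm
      ((simple.filter (fun sp' => pvM rp sp')).map (·.1)) := by
  unfold pvBSized
  have hperm := (PySem.List.sorted_perm
    ((simple.filter (fun sp => PySem.Set.issubset rp.2 sp.2)).map (fun sp => ((sp.2.length : Int), sp.1)))
    (fun c => toLex c) false).map (fun c : Int × String => c.2)
  rw [List.map_map] at hperm
  have heq : (simple.filter (fun sp => PySem.Set.issubset rp.2 sp.2)).map
      ((fun c : Int × String => c.2) ∘ fun sp : String × List (Int × Int) => ((sp.2.length : Int), sp.1))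
      = (simple.filter (fun sp' => pvM rp sp')).map (·.1) := by
    simp [pvM, Function.comp]
  rw [heq] at hperm
  exact hperm

-- under Pre_'s tie clause the two smallest candidates differ in size
theorem pvNoTie {rich simple : List (String × List (Int × Int))}
    {rp : String × List (Int × Int)} (hrp : rp ∈ rich)
    (htie : (rich.all (fun rp =>
      match ((simple.filter (fun sp => PySem.Set.issubset rp.2 sp.2)).map
          (fun sp => ((sp.2.length : Int)))).min? with
      | none => true
      | some m => decide ((((simple.filter (fun sp => PySem.Set.issubset rp.2 sp.2)).map
          (fun sp => ((sp.2.length : Int)))).count m) ≤ 1))) = true)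
    {c0 c1 : Int × String} {rest' : List (Int × String)}
    (hS : pvBSized rp simple = c0 :: c1 :: rest') :
    (c0.1 == c1.1) = false := by
  by_contra hne
  have ht : c0.1 = c1.1 := by
    cases h : (c0.1 == c1.1)
    · exact absurd h hne
    · exact by simpa using h
  set cand := (simple.filter (fun sp => PySem.Set.issubset rp.2 sp.2)).map
      (fun sp => ((sp.2.length : Int), sp.1)) with hcand
  set ms := (simple.filter (fun sp => PySem.Set.issubset rp.2 sp.2)).map
      (fun sp => ((sp.2.length : Int))) with hms
  have hperm : (c0 :: c1 :: rest').Perm cand := by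
    rw [← hS]
    exact PySem.List.sorted_perm _ _ _
  have hmsmap : ms = cand.map (·.1) := by
    rw [hcand, hms, List.map_map]
    rfl
  have hmem0 : c0.1 ∈ ms := by
    rw [hmsmap]
    exact List.mem_map_of_mem (hperm.mem_iff.1 (List.mem_cons_self))
  have hle : ∀ b ∈ ms, c0.1 ≤ b := by
    intro b hb
    rw [hmsmap] at hb
    obtain ⟨c, hc, hbc⟩ := List.mem_map.1 hb
    have := PySem.List.key_head_sorted_le cand (fun c => toLex c) hS c hc
    rcases Prod.Lex.le_iff.1 this with h | ⟨h, _⟩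
    · exact hbc ▸ le_of_lt h
    · exact hbc ▸ le_of_eq h
  have hmin : ms.min? = some c0.1 := List.min?_eq_some_iff.2 ⟨hmem0, hle⟩
  have hcount : 2 ≤ ms.count c0.1 := by
    have hpm : ((c0 :: c1 :: rest').map (·.1)).Perm ms := by
      rw [hmsmap]
      exact hperm.map _
    rw [← hpm.count_eq]
    have h1 : c1.1 = c0.1 := ht.symm
    simp only [List.map_cons, List.count_cons, h1]
    simp
  have := List.all_eq_true.1 htie rp hrp
  rw [hmin] at this
  have hc1 : ms.count c0.1 ≤ 1 := by simpa using this
  omega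

-- the pointwise core: A keeps rp in sp's set  ↔  B assigns rp to sp
theorem pvCore {rich simple : List (String × List (Int × Int))}
    (hr : (rich.map Prod.fst).Nodup) (hs : (simple.map Prod.fst).Nodup)
    (htie : (rich.all (fun rp =>
      match ((simple.filter (fun sp => PySem.Set.issubset rp.2 sp.2)).map
          (fun sp => ((sp.2.length : Int)))).min? with
      | none => true
      | some m => decide ((((simple.filter (fun sp => PySem.Set.issubset rp.2 sp.2)).map
          (fun sp => ((sp.2.length : Int)))).count m) ≤ 1))) = true)
    {sp : String × List (Int × Int)} (hsp : sp ∈ simple)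
    {rp : String × List (Int × Int)} (hrp : rp ∈ rich) :
    ((!pvRemP simple sp.1 (rp.1, (pvCnt rich simple rp.1 : PySem.Set String))) && pvM rp sp)
      = pvBKeep simple sp.1 rp := by
  have hSeq := pvSizedEq hr hs hrp (simple := simple)
  have hlen : (pvCnt rich simple rp.1).length = (pvBSized rp simple).length := by
    rw [pvF1 hr hrp]
    unfold pvBSized
    rw [PySem.List.length_sorted]
    rw [List.length_map, List.length_map]
    rfl
  cases hm : pvM rp sp
  · rw [Bool.and_false]
    unfold pvBKeep pvWinF
    cases hS : pvBSized rp simple with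
    | nil => rfl
    | cons c0 rest =>
      have hc0 : (c0.2 == sp.1) = false := by
        obtain ⟨sp', hsp', hm', hname⟩ := pvMemSized (c := c0) (by rw [hS]; exact List.mem_cons_self)
        by_contra hne
        have heq : c0.2 = sp.1 := by
          cases h : (c0.2 == sp.1)
          · exact absurd h hne
          · exact by simpa using h
        have : sp' = sp := pvNameInj hs hsp' hsp (by rw [hname, heq])
        rw [this] at hm'
        rw [hm'] at hm
        cases hm
      cases rest with
      | nil => simpa using hc0
      | cons c1 rest' =>
        by_cases hti : (c0.1 == c1.1) = true
        · simp [hti]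
        · have hti' : (c0.1 == c1.1) = false := by simpa using hti
          simp [hti', hc0]
  · rw [Bool.and_true]
    have hspmem : sp.1 ∈ (pvBSized rp simple).map (·.2) := by
      refine (pvSizedSnd simple rp).mem_iff.2 ?_
      exact List.mem_map_of_mem (List.mem_filter.2 ⟨hsp, hm⟩)
    have hsnodup : ((pvBSized rp simple).map (·.2)).Nodup := by
      refine (pvSizedSnd simple rp).nodup_iff.2 ?_
      exact List.Nodup.sublist (List.Sublist.map _ List.filter_sublist) hs
    cases hS : pvBSized rp simple with
    | nil =>
      rw [hS] at hspmem
      cases hspmem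
    | cons c0 rest =>
      cases rest with
      | nil =>
        have hcnt1 : ((pvCnt rich simple rp.1 : PySem.Set String)).length = 1 := by
          rw [hlen, hS]
          rfl
        have hrem : pvRemP simple sp.1 (rp.1, (pvCnt rich simple rp.1 : PySem.Set String)) = false := by
          unfold pvRemP
          simp [hcnt1]
        rw [hrem]
        rw [hS] at hspmem
        simp only [List.map_cons, List.map_nil, List.mem_cons, List.not_mem_nil, or_false] at hspmem
        unfold pvBKeep pvWinF
        rw [hS]
        simp [hspmem]
      | cons c1 rest' =>
        have hti : (c0.1 == c1.1) = false := pvNoTie hrp htie hS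
        have hcnt : (((pvCnt rich simple rp.1 : PySem.Set String)).length == 1) = false := by
          rw [hlen, hS]
          rw [beq_eq_false_iff_ne]
          simp only [List.length_cons]
          omega
        have hrem : pvRemP simple sp.1 (rp.1, (pvCnt rich simple rp.1 : PySem.Set String)) =
            decide (sp.1 ∈ (c1 :: rest').map (·.2)) := by
          unfold pvRemP
          simp only [hcnt, Bool.false_eq_true, if_false]
          rw [show pvASized simple ((pvCnt rich simple rp.1 : PySem.Set String)) = c0 :: c1 :: rest' from hSeq.trans hS]
          simp only [hti, Bool.false_eq_true, if_false]
        rw [hrem]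
        unfold pvBKeep pvWinF
        rw [hS]
        simp only [hti, Bool.false_eq_true, if_false]
        rw [hS] at hspmem hsnodup
        simp only [List.map_cons, List.nodup_cons, List.mem_cons] at hspmem hsnodup
        by_cases hps : sp.1 = c0.2
        · have hnotin : sp.1 ∉ (c1 :: rest').map (·.2) := by
            rw [hps]
            intro hmem
            exact hsnodup.1 (by simpa using hmem)
          have h1 : decide (sp.1 ∈ (c1 :: rest').map (·.2)) = false := by
            simpa using hnotin
          rw [h1]
          have h2 : (c0.2 == sp.1) = true := by simp [hps]
          rw [h2]
          rfl
        · have hin : sp.1 ∈ ((c1 :: rest').map (·.2)) := by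
            rcases hspmem with h | h
            · exact absurd h hps
            · simpa using h
          have h1 : decide (sp.1 ∈ (c1 :: rest').map (·.2)) = true := by
            simpa using hin
          rw [h1]
          have hne : (c0.2 == sp.1) = false := by
            rw [beq_eq_false_iff_ne]
            exact fun h => hps h.symm
          rw [hne]
          rfl

-- ===== VERDICT (by name: the statement is the Claim_ definition above) =====
theorem get_param_mapping_py_spec : Claim_equal_get_param_mapping_py := by
  intro rich simple _ hpre
  obtain ⟨_, hr, hs, htie⟩ := hpre
  unfold Spec_get_param_mapping_py
  -- names of the matched simple params, in simple order
  have hMSnodup : ((pvMS rich simple).map (·.1)).Nodup := pvMSNamesNodup hs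
  -- ===== A side =====
  have hA : get_param_mapping_py rich simple =
      ((pvR2S rich simple).items.foldl (pvAPass2Step simple) (pvS2R rich simple)).items := by
    unfold get_param_mapping_py
    rw [pvL1]
  have hS2Rkeys : (pvS2R rich simple).keys = (pvMS rich simple).map (·.1) := by
    unfold pvS2R
    rw [pvL5, PySem.Dict.keys_empty]
    rw [show PySem.Set.update ([] : PySem.Set String) ((pvMS rich simple).map (·.1))
        = PySem.Set.ofList ((pvMS rich simple).map (·.1)) from PySem.Set.update_empty _]
    exact PySem.Set.ofList_eq_self_of_nodup _ hMSnodup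
  have hR2Sitems := pvR2SItems rich simple hs
  have hsafe : ∀ item ∈ (pvR2S rich simple).items, ∀ q ∈ item.2, q ∈ (pvS2R rich simple).keys := by
    intro item hitem q hq
    rw [hR2Sitems] at hitem
    obtain ⟨k, _, rfl⟩ := List.mem_map.1 hitem
    obtain ⟨sp', hsp', hname⟩ := List.mem_map.1 hq
    have hpred := List.of_mem_filter hsp'
    obtain ⟨rp', hrp', hb⟩ := List.any_eq_true.1 hpred
    have hm' : pvM rp' sp' = true := by
      cases h : pvM rp' sp'
      · rw [h] at hb; simp at hb
      · rfl
    rw [hS2Rkeys, ← hname]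
    refine List.mem_map_of_mem (List.mem_filter.2 ⟨List.mem_of_mem_filter hsp', ?_⟩)
    exact List.any_eq_true.2 ⟨rp', hrp', hm'⟩
  have hAkeys : (((pvR2S rich simple).items.foldl (pvAPass2Step simple) (pvS2R rich simple))).keys
      = (pvMS rich simple).map (·.1) := by
    rw [pvL11 _ _ _ hsafe, hS2Rkeys]
  have hAitems : (((pvR2S rich simple).items.foldl (pvAPass2Step simple) (pvS2R rich simple))).items
      = ((pvMS rich simple).map (·.1)).map (fun p =>
          (p, (((pvR2S rich simple).items.foldl (pvAPass2Step simple) (pvS2R rich simple))).getD p [])) := by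
    rw [← hAkeys]
    exact PySem.Dict.items_eq_map_keys _ (by rw [hAkeys]; exact hMSnodup) []
  -- ===== B side =====
  have hBwin : rich.foldl (pvBWinnersStep simple) [] = rich.filterMap (pvWinF simple) := by
    simpa using pvL16 simple rich []
  have hB : get_param_mapping_py_alt rich simple =
      ((rich.filterMap (pvWinF simple)).foldl pvBFillStep
        (simple.foldl (pvBSeedStep rich) PySem.Dict.empty)).items := by
    unfold get_param_mapping_py_alt
    rw [hBwin]
  have hseedkeys : (simple.foldl (pvBSeedStep rich) PySem.Dict.empty).keys
      = (pvMS rich simple).map (·.1) := by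
    rw [pvL13, PySem.Dict.keys_empty]
    rw [show PySem.Set.update ([] : PySem.Set String) ((pvMS rich simple).map (·.1))
        = PySem.Set.ofList ((pvMS rich simple).map (·.1)) from PySem.Set.update_empty _]
    exact PySem.Set.ofList_eq_self_of_nodup _ hMSnodup
  have hwinner2 : ∀ w ∈ rich.filterMap (pvWinF simple), w.2 ∈ (pvMS rich simple).map (·.1) := by
    intro w hw
    obtain ⟨rp, hrp, hwf⟩ := List.mem_filterMap.1 hw
    have hex : ∃ c0, c0 ∈ pvBSized rp simple ∧ w.2 = c0.2 := by
      unfold pvWinF at hwf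
      cases hS : pvBSized rp simple with
      | nil => rw [hS] at hwf; cases hwf
      | cons c0 rest =>
        rw [hS] at hwf
        cases rest with
        | nil =>
          cases hwf
          exact ⟨c0, List.mem_cons_self, rfl⟩
        | cons c1 rest' =>
          by_cases ht : (c0.1 == c1.1) = true
          · simp only [ht, if_pos] at hwf
            cases hwf
          · simp only [ht, Bool.false_eq_true, if_false] at hwf
            cases hwf
            exact ⟨c0, List.mem_cons_self, rfl⟩
    obtain ⟨c0, hc0, hw2⟩ := hex
    obtain ⟨sp', hsp', hm', hname⟩ := pvMemSized hc0
    rw [hw2, ← hname]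
    refine List.mem_map_of_mem (List.mem_filter.2 ⟨hsp', ?_⟩)
    exact List.any_eq_true.2 ⟨rp, hrp, hm'⟩
  have hBkeys : (((rich.filterMap (pvWinF simple)).foldl pvBFillStep
      (simple.foldl (pvBSeedStep rich) PySem.Dict.empty))).keys = (pvMS rich simple).map (·.1) := by
    rw [pvL15 _ _ (fun w hw => by rw [hseedkeys]; exact hwinner2 w hw), hseedkeys]
  have hBitems : (((rich.filterMap (pvWinF simple)).foldl pvBFillStep
      (simple.foldl (pvBSeedStep rich) PySem.Dict.empty))).items
      = ((pvMS rich simple).map (·.1)).map (fun p =>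
          (p, (((rich.filterMap (pvWinF simple)).foldl pvBFillStep
            (simple.foldl (pvBSeedStep rich) PySem.Dict.empty))).getD p [])) := by
    rw [← hBkeys]
    exact PySem.Dict.items_eq_map_keys _ (by rw [hBkeys]; exact hMSnodup) []
  -- ===== pointwise value equality =====
  rw [hA, hB, hAitems, hBitems]
  apply List.map_congr_left
  intro p hp
  obtain ⟨sp, hspMS, rfl⟩ := List.mem_map.1 hp
  have hsp : sp ∈ simple := List.mem_of_mem_filter hspMS
  refine congrArg (fun v => (sp.1, v)) ?_
  -- A's value at sp.1
  have hS2RgetD : (pvS2R rich simple).getD sp.1 [] = pvValS rich sp := by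
    unfold pvS2R
    rw [pvL4 rich simple hs PySem.Dict.empty sp.1, pvFindName hs hsp]
    show PySem.Set.update ((PySem.Dict.empty : PySem.Dict String (PySem.Set String)).getD sp.1 [])
        (pvValS rich sp) = pvValS rich sp
    rw [PySem.Dict.getD_empty]
    rw [show PySem.Set.update ([] : PySem.Set String) (pvValS rich sp)
        = PySem.Set.ofList (pvValS rich sp) from PySem.Set.update_empty _]
    exact PySem.Set.ofList_eq_self_of_nodup _ (pvValSNodup hr sp)
  have hAval : (((pvR2S rich simple).items.foldl (pvAPass2Step simple) (pvS2R rich simple))).getD sp.1 []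
      = (rich.filter (fun rp => (!pvRemP simple sp.1 (rp.1, (pvCnt rich simple rp.1 : PySem.Set String)))
          && pvM rp sp)).map (·.1) := by
    rw [pvL10, hS2RgetD, hR2Sitems, pvL18]
    have hcong : (pvValS rich sp).filter (fun x =>
        !(((pvRKeys rich simple).map (fun q => (q, (pvCnt rich simple q : PySem.Set String)))).any
          (fun item => pvRemP simple sp.1 item && item.1 == x)))
        = (pvValS rich sp).filter (fun x => !pvRemP simple sp.1 (x, (pvCnt rich simple x : PySem.Set String))) := by
      apply List.filter_congr
      intro x hx
      have hxk : x ∈ pvRKeys rich simple := by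
        obtain ⟨rp', hrp', rfl⟩ := List.mem_map.1 hx
        apply (PySem.Set.mem_ofList _ _).2
        exact List.mem_flatMap.2 ⟨sp, hsp, List.mem_map_of_mem hrp'⟩
      rw [pvAnyItems rich simple _ hxk]
    rw [hcong]
    unfold pvValS
    rw [List.filter_map, List.filter_filter]
    rfl
  -- B's value at sp.1
  have hseedgetD : (simple.foldl (pvBSeedStep rich) PySem.Dict.empty).getD sp.1 [] = [] := by
    rw [pvL12, PySem.Dict.getD_empty]
    split <;> rfl
  have hBval : (((rich.filterMap (pvWinF simple)).foldl pvBFillStep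
      (simple.foldl (pvBSeedStep rich) PySem.Dict.empty))).getD sp.1 []
      = (rich.filter (pvBKeep simple sp.1)).map (·.1) := by
    rw [pvL14, hseedgetD]
    rw [show PySem.Set.update ([] : PySem.Set String)
        ((((rich.filterMap (pvWinF simple)).filter (fun w => w.2 == sp.1))).map (·.1))
        = PySem.Set.ofList ((((rich.filterMap (pvWinF simple)).filter (fun w => w.2 == sp.1))).map (·.1))
        from PySem.Set.update_empty _]
    rw [pvL19]
    apply PySem.Set.ofList_eq_self_of_nodup
    exact List.Nodup.sublist (List.Sublist.map _ List.filter_sublist) hr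
  rw [hAval, hBval]
  congr 1
  apply List.filter_congr
  intro rp hrp
  exact pvCore hr hs htie hsp hrp
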